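-- pv_equiv track=rewrite | github.com/sontung/location-based-generative | data_loader.py | hash_sg
-- ===== SOURCE A (Python) =====
-- def hash_sg(relationships,
--             ob_names=('brown', 'purple', 'cyan', 'blue', 'red', 'green', 'gray',
--                       "00", "01", "02", "10", "11", "12")):
--     """
--     hash into unique ID
--     :param relationships: [['brown', 'left', 'purple'] , ['yellow', 'up', 'yellow']]
--     :param ob_names:
--     :return:
--     """
--     for rel in relationships:
--         assert rel[0] in ob_names and rel[2] in ob_names
--
--     a_key = [0] * len(ob_names) * len(ob_names)
--     pred2id = {"none": 0, "left": 1, "up": 2, "front": 3}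
--     predefined_objects1 = ob_names[:]
--     predefined_objects2 = ob_names[:]
--     pair2pred = {}
--     for rel in relationships:
--         if rel[1] != "__in_image__":
--             pair2pred[(rel[0], rel[2])] = pred2id[rel[1]]
--
--     idx = 0
--     for ob1 in predefined_objects1:
--         for ob2 in predefined_objects2:
--             if (ob1, ob2) in pair2pred:
--                 a_key[idx] = pair2pred[(ob1, ob2)]
--             idx += 1
--     return tuple(a_key)
-- ===== SOURCE B (Python) =====
-- def hash_sg(relationships,
--             ob_names=('brown', 'purple', 'cyan', 'blue', 'red', 'green', 'gray',
--                       "00", "01", "02", "10", "11", "12")):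
--     for rel in relationships:
--         assert rel[0] in ob_names and rel[2] in ob_names
--
--     n = len(ob_names)
--     pred2id = {"none": 0, "left": 1, "up": 2, "front": 3}
--     # object name -> all positions holding it (handles duplicate names exactly)
--     pos = {}
--     for i, name in enumerate(ob_names):
--         pos.setdefault(name, []).append(i)
--
--     a_key = [0] * (n * n)
--     # one direct-placement pass over the relationships, in order (last write wins)
--     for rel in relationships:
--         if rel[1] != "__in_image__":
--             p = pred2id[rel[1]]
--             for i in pos[rel[0]]:
--                 for j in pos[rel[2]]:
--                     a_key[i * n + j] = p
--     return tuple(a_key)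
-- ===== Notes on version B (the rewrite author's own statement) =====
-- stated objective: alternative
-- what changed: A scans all n*n ordered object pairs against a pair->predicate dict; B builds an object-name->positions index once and makes a single direct-placement pass over the relationships, writing each predicate id straight into its grid cell.
import Mathlib
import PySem

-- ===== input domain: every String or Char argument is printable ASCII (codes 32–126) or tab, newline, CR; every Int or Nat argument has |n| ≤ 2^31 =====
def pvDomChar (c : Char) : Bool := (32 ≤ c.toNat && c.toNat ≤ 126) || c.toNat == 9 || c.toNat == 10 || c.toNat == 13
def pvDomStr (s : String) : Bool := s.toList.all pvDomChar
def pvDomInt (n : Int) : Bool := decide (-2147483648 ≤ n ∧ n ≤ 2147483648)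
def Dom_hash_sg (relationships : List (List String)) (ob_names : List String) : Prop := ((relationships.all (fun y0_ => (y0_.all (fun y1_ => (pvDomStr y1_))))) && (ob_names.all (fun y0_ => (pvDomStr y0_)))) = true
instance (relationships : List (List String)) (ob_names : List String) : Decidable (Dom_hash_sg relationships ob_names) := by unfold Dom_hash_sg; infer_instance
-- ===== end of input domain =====

-- B replaces A's scan over all n*n ordered object pairs by one direct-placement pass over the
-- relationships, driven by an object-name -> positions index (objective: alternative decomposition).

-- shared constant table: pred2id = {"none": 0, "left": 1, "up": 2, "front": 3}
def pv_pred2id : PySem.Dict String Int :=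
  PySem.Dict.ofList [("none", 0), ("left", 1), ("up", 2), ("front", 3)]

-- ===== PORT A =====
-- A's assert loop over relationships raises exactly outside Pre_hash_sg; inside Pre_ it is a no-op
def hash_sg (relationships : List (List String)) (ob_names : List String) : List Int :=
  let n := ob_names.length
  let a_key : List Int := List.replicate (n * n) 0
  let pair2pred : PySem.Dict (String × String) Int :=
    relationships.foldl (fun d rel =>
      if PySem.List.pyGetD rel 1 "" ≠ "__in_image__" then
        PySem.Dict.insert d (PySem.List.pyGetD rel 0 "", PySem.List.pyGetD rel 2 "")
          (PySem.Dict.getD pv_pred2id (PySem.List.pyGetD rel 1 "") 0)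
      else d) PySem.Dict.empty
  (ob_names.foldl (fun (st : List Int × Nat) ob1 =>
    ob_names.foldl (fun (st : List Int × Nat) ob2 =>
      ((match PySem.Dict.get? pair2pred (ob1, ob2) with
        | some v => st.1.set st.2 v
        | none => st.1), st.2 + 1)) st) (a_key, 0)).1

-- ===== PORT B =====
-- 'for i, name in enumerate(ob_names)' is ported as a fold carrying the explicit counter i
def hash_sg_alt (relationships : List (List String)) (ob_names : List String) : List Int :=
  let n := ob_names.length
  let pos : PySem.Dict String (List Nat) :=
    (ob_names.foldl (fun (st : PySem.Dict String (List Nat) × Nat) name =>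
      (PySem.Dict.insert st.1 name (PySem.Dict.getD st.1 name [] ++ [st.2]), st.2 + 1))
      (PySem.Dict.empty, 0)).1
  relationships.foldl (fun a rel =>
    if PySem.List.pyGetD rel 1 "" ≠ "__in_image__" then
      (PySem.Dict.getD pos (PySem.List.pyGetD rel 0 "") []).foldl (fun a i =>
        (PySem.Dict.getD pos (PySem.List.pyGetD rel 2 "") []).foldl (fun a j =>
          a.set (i * n + j) (PySem.Dict.getD pv_pred2id (PySem.List.pyGetD rel 1 "") 0)) a) a
    else a) (List.replicate (n * n) 0)

-- ===== PRECONDITION & SPEC =====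
-- Pre_ excludes exactly the inputs where Python A raises: a relationship shorter than 3 entries
-- (IndexError), an endpoint not in ob_names (AssertionError), or a predicate outside
-- pred2id ∪ {"__in_image__"} (KeyError).
def Pre_hash_sg (relationships : List (List String)) (ob_names : List String) : Prop :=
  ∀ rel ∈ relationships, 3 ≤ rel.length ∧
    PySem.List.pyGetD rel 0 "" ∈ ob_names ∧
    PySem.List.pyGetD rel 2 "" ∈ ob_names ∧
    PySem.List.pyGetD rel 1 "" ∈ (["none", "left", "up", "front", "__in_image__"] : List String)
instance (relationships : List (List String)) (ob_names : List String) : Decidable (Pre_hash_sg relationships ob_names) := by unfold Pre_hash_sg; infer_instance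

def pvWitness_hash_sg : List (List String) × List String :=
  ([["brown", "left", "purple"], ["cyan", "__in_image__", "brown"]],
   ["brown", "purple", "cyan"])

def Spec_hash_sg (relationships : List (List String)) (ob_names : List String) (out : List Int) : Prop := out = hash_sg_alt relationships ob_names
instance (relationships : List (List String)) (ob_names : List String) (out : List Int) : Decidable (Spec_hash_sg relationships ob_names out) := by unfold Spec_hash_sg; infer_instance

-- ===== CLAIM (what is proved, stated in full; the proofs are below) =====
def Claim_equal_hash_sg : Prop := ∀ (relationships : List (List String)) (ob_names : List String), Dom_hash_sg relationships ob_names → Pre_hash_sg relationships ob_names → Spec_hash_sg relationships ob_names (hash_sg relationships ob_names)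

-- ===== LEMMAS AND PROOFS =====

-- A's pair2pred dict (definitionally the fold inside hash_sg)
def pvDict (relationships : List (List String)) : PySem.Dict (String × String) Int :=
  relationships.foldl (fun d rel =>
    if PySem.List.pyGetD rel 1 "" ≠ "__in_image__" then
      PySem.Dict.insert d (PySem.List.pyGetD rel 0 "", PySem.List.pyGetD rel 2 "")
        (PySem.Dict.getD pv_pred2id (PySem.List.pyGetD rel 1 "") 0)
    else d) PySem.Dict.empty

-- B's positions dict (definitionally the fold inside hash_sg_alt)
def pvPos (ob_names : List String) : PySem.Dict String (List Nat) :=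
  (ob_names.foldl (fun (st : PySem.Dict String (List Nat) × Nat) name =>
    (PySem.Dict.insert st.1 name (PySem.Dict.getD st.1 name [] ++ [st.2]), st.2 + 1))
    (PySem.Dict.empty, 0)).1

def pvStepA (d : PySem.Dict (String × String) Int) (ob1 : String)
    (st : List Int × Nat) (ob2 : String) : List Int × Nat :=
  ((match PySem.Dict.get? d (ob1, ob2) with
    | some v => st.1.set st.2 v
    | none => st.1), st.2 + 1)

def pvStepB (ob_names : List String) (a : List Int) (rel : List String) : List Int :=
  if PySem.List.pyGetD rel 1 "" ≠ "__in_image__" then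
    (PySem.Dict.getD (pvPos ob_names) (PySem.List.pyGetD rel 0 "") []).foldl (fun a i =>
      (PySem.Dict.getD (pvPos ob_names) (PySem.List.pyGetD rel 2 "") []).foldl (fun a j =>
        a.set (i * ob_names.length + j) (PySem.Dict.getD pv_pred2id (PySem.List.pyGetD rel 1 "") 0)) a) a
  else a

-- the grid both programs compute: one row per ob1, row entry for ob2 = dict lookup with default 0
def pvRow (d : PySem.Dict (String × String) Int) (obs : List String) (ob1 : String) : List Int :=
  obs.map (fun ob2 => (PySem.Dict.get? d (ob1, ob2)).getD 0)

def pvGrid (d : PySem.Dict (String × String) Int) (obs : List String) : List Int :=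
  obs.flatMap (pvRow d obs)

-- occurrence positions of name in l, offset by k
def pvIdxs (l : List String) (k : Nat) (name : String) : List Nat :=
  match l with
  | [] => []
  | x :: xs => (if x = name then [k] else []) ++ pvIdxs xs (k + 1) name

theorem hash_sg_eq (relationships : List (List String)) (ob_names : List String) :
    hash_sg relationships ob_names
    = (ob_names.foldl (fun st ob1 => ob_names.foldl (pvStepA (pvDict relationships) ob1) st)
        (List.replicate (ob_names.length * ob_names.length) 0, 0)).1 := rfl

theorem hash_sg_alt_eq (relationships : List (List String)) (ob_names : List String) :
    hash_sg_alt relationships ob_names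
    = relationships.foldl (pvStepB ob_names)
        (List.replicate (ob_names.length * ob_names.length) 0) := rfl

theorem innerA_eq (d : PySem.Dict (String × String) Int) (ob1 : String) :
    ∀ (obs2 : List String) (done : List Int) (c : Nat), obs2.length ≤ c →
    obs2.foldl (pvStepA d ob1) (done ++ List.replicate c 0, done.length)
    = (done ++ obs2.map (fun ob2 => (PySem.Dict.get? d (ob1, ob2)).getD 0)
        ++ List.replicate (c - obs2.length) 0, done.length + obs2.length) := by
  intro obs2
  induction obs2 with
  | nil => intro done c _; simp
  | cons x xs ih =>
    intro done c hc
    simp only [List.length_cons] at hc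
    obtain ⟨c', rfl⟩ : ∃ c', c = c' + 1 := ⟨c - 1, by omega⟩
    have hstep : pvStepA d ob1 (done ++ List.replicate (c' + 1) 0, done.length) x
        = ((done ++ [(PySem.Dict.get? d (ob1, x)).getD 0]) ++ List.replicate c' 0,
           (done ++ [(PySem.Dict.get? d (ob1, x)).getD 0]).length) := by
      unfold pvStepA
      have hrep : List.replicate (c' + 1) (0 : Int) = 0 :: List.replicate c' 0 := rfl
      cases h : PySem.Dict.get? d (ob1, x) with
      | some v => simp [hrep]
      | none => simp [hrep]
    rw [List.foldl_cons, hstep,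
      ih (done ++ [(PySem.Dict.get? d (ob1, x)).getD 0]) c' (by omega)]
    simp [Nat.add_assoc, Nat.add_comm 1]

theorem outerA_eq (d : PySem.Dict (String × String) Int) (obs : List String) :
    ∀ (obs1 : List String) (done : List Int) (c : Nat), obs1.length * obs.length ≤ c →
    obs1.foldl (fun st ob1 => obs.foldl (pvStepA d ob1) st) (done ++ List.replicate c 0, done.length)
    = (done ++ obs1.flatMap (pvRow d obs) ++ List.replicate (c - obs1.length * obs.length) 0,
       done.length + obs1.length * obs.length) := by
  intro obs1
  induction obs1 with
  | nil => intro done c _; simp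
  | cons x xs ih =>
    intro done c hc
    simp only [List.length_cons, Nat.succ_mul] at hc
    rw [List.foldl_cons, innerA_eq d x obs done c (by omega)]
    have h2 := ih (done ++ obs.map (fun ob2 => (PySem.Dict.get? d (x, ob2)).getD 0)) (c - obs.length) (by omega)
    rw [show done.length + obs.length = (done ++ obs.map (fun ob2 => (PySem.Dict.get? d (x, ob2)).getD 0)).length by simp]
    rw [h2]
    simp only [Prod.mk.injEq]
    constructor
    · simp only [List.flatMap_cons, List.append_assoc, pvRow, List.length_cons, Nat.succ_mul]
      congr 3
      rw [show c - obs.length - xs.length * obs.length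
          = c - (xs.length * obs.length + obs.length) by omega]
    · simp only [List.length_append, List.length_map]
      simp
      ring

theorem posfold_getD (name : String) :
    ∀ (l : List String) (d0 : PySem.Dict String (List Nat)) (k0 : Nat),
    PySem.Dict.getD ((l.foldl (fun (st : PySem.Dict String (List Nat) × Nat) x =>
        (PySem.Dict.insert st.1 x (PySem.Dict.getD st.1 x [] ++ [st.2]), st.2 + 1)) (d0, k0)).1)
      name []
    = PySem.Dict.getD d0 name [] ++ pvIdxs l k0 name := by
  intro l
  induction l with
  | nil => intro d0 k0; simp [pvIdxs]
  | cons x xs ih =>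
    intro d0 k0
    rw [List.foldl_cons, ih, pvIdxs, PySem.Dict.getD_insert]
    by_cases h : name = x
    · simp [h]
    · simp only [if_neg h]
      have hx : ¬x = name := fun hh => h hh.symm
      simp [hx]

theorem mem_pvIdxs (name : String) (i : Nat) :
    ∀ (l : List String) (k : Nat),
    i ∈ pvIdxs l k name ↔ ∃ t, ∃ _ : t < l.length, l[t] = name ∧ i = k + t := by
  intro l
  induction l with
  | nil => intro k; simp [pvIdxs]
  | cons x xs ih =>
    intro k
    simp only [pvIdxs, List.mem_append, ih]
    constructor
    · rintro (h | ⟨t, ht, h1, h2⟩)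
      · split_ifs at h with hx
        · simp at h
          exact ⟨0, by simp, by simpa using hx, by omega⟩
        · simp at h
      · exact ⟨t + 1, by simp; omega, by simpa using h1, by omega⟩
    · rintro ⟨t, ht, h1, h2⟩
      cases t with
      | zero => left; simp at h1; simp [h1, h2]
      | succ t =>
        right
        exact ⟨t, by simp at ht; omega, by simpa using h1, by omega⟩

theorem setMany_getElem? (p : Int) :
    ∀ (ks : List Nat) (a : List Int) (k : Nat),
    ((ks.foldl (fun a i => a.set i p) a))[k]? =
      if k ∈ ks ∧ k < a.length then some p else a[k]? := by
  intro ks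
  induction ks with
  | nil => intro a k; simp
  | cons x xs ih =>
    intro a k
    rw [List.foldl_cons, ih, List.length_set]
    have hset : (a.set x p)[k]? = if x = k ∧ x < a.length then some p else a[k]? := by
      rw [List.getElem?_set]
      split_ifs with h1 h2 h3 <;> simp_all <;> omega
    by_cases hk : k < a.length
    · by_cases hmem : k ∈ xs
      · simp [hmem, hk]
      · rw [hset]
        by_cases hx : x = k <;> simp [hx, hmem, hk, List.mem_cons, eq_comm]
    · simp only [hk, and_false, if_false, List.mem_cons]
      rw [hset]
      split_ifs with h <;> [omega ; rfl]

theorem A_grid (relationships : List (List String)) (ob_names : List String) :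
    hash_sg relationships ob_names = pvGrid (pvDict relationships) ob_names := by
  rw [hash_sg_eq]
  have h := outerA_eq (pvDict relationships) ob_names ob_names []
    (ob_names.length * ob_names.length) (le_refl _)
  simp only [List.nil_append, List.length_nil, Nat.zero_add] at h
  rw [h]
  simp [pvGrid]

theorem mem_pvPos (obs : List String) (name : String) (i : Nat) :
    i ∈ PySem.Dict.getD (pvPos obs) name []
    ↔ ∃ _ : i < obs.length, obs[i] = name := by
  unfold pvPos
  rw [posfold_getD]
  have h0 : PySem.Dict.getD (PySem.Dict.empty : PySem.Dict String (List Nat)) name [] = [] := rfl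
  rw [h0, List.nil_append, mem_pvIdxs]
  constructor
  · rintro ⟨t, ht, h1, rfl⟩; simpa using ⟨ht, h1⟩
  · rintro ⟨hi, h1⟩; exact ⟨i, hi, h1, by omega⟩

theorem grid_length_aux (d : PySem.Dict (String × String) Int) (obs : List String) :
    ∀ (l : List String), (l.flatMap (pvRow d obs)).length = l.length * obs.length := by
  intro l
  induction l with
  | nil => simp
  | cons x xs ih => simp [List.flatMap_cons, ih, pvRow, Nat.succ_mul]; ring

theorem grid_length (d : PySem.Dict (String × String) Int) (obs : List String) :
    (pvGrid d obs).length = obs.length * obs.length := grid_length_aux d obs obs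

theorem grid_getElem?_aux (d : PySem.Dict (String × String) Int) (obs : List String) :
    ∀ (l : List String) (i j : Nat), ∀ _ : i < l.length, ∀ _ : j < obs.length,
    (l.flatMap (pvRow d obs))[i * obs.length + j]?
      = some ((PySem.Dict.get? d (l[i], obs[j])).getD 0) := by
  intro l
  induction l with
  | nil => intro i j hi hj; simp at hi
  | cons x xs ih =>
    intro i j hi hj
    rw [List.flatMap_cons]
    cases i with
    | zero =>
      rw [List.getElem?_append_left (by simp [pvRow]; omega)]
      simp [pvRow, List.getElem?_eq_getElem hj]
    | succ i =>
      have hlen : (pvRow d obs x).length = obs.length := by simp [pvRow]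
      rw [List.getElem?_append_right (by rw [hlen]; ring_nf; omega)]
      rw [hlen, show (i + 1) * obs.length + j - obs.length = i * obs.length + j by ring_nf; omega]
      rw [ih i j (by simpa using hi) hj]
      simp

theorem grid_getElem? (d : PySem.Dict (String × String) Int) (obs : List String)
    (i j : Nat) (hi : i < obs.length) (hj : j < obs.length) :
    (pvGrid d obs)[i * obs.length + j]?
      = some ((PySem.Dict.get? d (obs[i], obs[j])).getD 0) :=
  grid_getElem?_aux d obs obs i j hi hj

theorem writeRel_eq (obs : List String) (d : PySem.Dict (String × String) Int)
    (r0 r2 : String) (p : Int) :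
    ((PySem.Dict.getD (pvPos obs) r0 []).foldl (fun a i =>
      (PySem.Dict.getD (pvPos obs) r2 []).foldl (fun a j =>
        a.set (i * obs.length + j) p) a) (pvGrid d obs))
    = pvGrid (PySem.Dict.insert d (r0, r2) p) obs := by
  have hflat : ((PySem.Dict.getD (pvPos obs) r0 []).foldl (fun a i =>
      (PySem.Dict.getD (pvPos obs) r2 []).foldl (fun a j =>
        a.set (i * obs.length + j) p) a) (pvGrid d obs))
      = (((PySem.Dict.getD (pvPos obs) r0 []).flatMap (fun i =>
          (PySem.Dict.getD (pvPos obs) r2 []).map (fun j => i * obs.length + j))).foldl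
          (fun a k => a.set k p) (pvGrid d obs)) := by
    rw [List.foldl_flatMap]
    simp only [List.foldl_map]
  rw [hflat]
  apply List.ext_getElem?
  intro k
  rw [setMany_getElem?]
  by_cases hk : k < obs.length * obs.length
  · have hn : 0 < obs.length := by
      by_contra h
      rw [Nat.not_lt] at h
      have h0 : obs.length = 0 := by omega
      rw [h0] at hk
      simp at hk
    have hi0 : k / obs.length < obs.length := (Nat.div_lt_iff_lt_mul hn).mpr hk
    have hj0 : k % obs.length < obs.length := Nat.mod_lt _ hn
    have hkeq : k / obs.length * obs.length + k % obs.length = k := by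
      rw [Nat.mul_comm]; exact Nat.div_add_mod k obs.length
    have hmem : (k ∈ (PySem.Dict.getD (pvPos obs) r0 []).flatMap (fun i =>
        (PySem.Dict.getD (pvPos obs) r2 []).map (fun j => i * obs.length + j)))
        ↔ (obs[k / obs.length]'hi0 = r0 ∧ obs[k % obs.length]'hj0 = r2) := by
      simp only [List.mem_flatMap, List.mem_map, mem_pvPos]
      constructor
      · rintro ⟨i, ⟨hi, hobs⟩, j, ⟨hj, hobs2⟩, hk2⟩
        have hdiv : (i * obs.length + j) / obs.length = i := by
          rw [Nat.mul_comm, Nat.mul_add_div hn, Nat.div_eq_of_lt hj, Nat.add_zero]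
        have hmod : (i * obs.length + j) % obs.length = j := by
          rw [Nat.mul_comm, Nat.mul_add_mod]; exact Nat.mod_eq_of_lt hj
        have hti : k / obs.length = i := by rw [← hk2, hdiv]
        have huj : k % obs.length = j := by rw [← hk2, hmod]
        constructor
        · rw [List.getElem_eq_iff, hti, ← hobs]; exact (List.getElem?_eq_getElem hi)
        · rw [List.getElem_eq_iff, huj, ← hobs2]; exact (List.getElem?_eq_getElem hj)
      · rintro ⟨h1, h2⟩
        exact ⟨k / obs.length, ⟨hi0, h1⟩, k % obs.length, ⟨hj0, h2⟩, hkeq⟩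
    have hlen : k < (pvGrid d obs).length := by rw [grid_length]; exact hk
    have hrhs := grid_getElem? (PySem.Dict.insert d (r0, r2) p) obs
      (k / obs.length) (k % obs.length) hi0 hj0
    rw [hkeq] at hrhs
    rw [hrhs, PySem.Dict.get?_insert]
    by_cases hmatch : obs[k / obs.length]'hi0 = r0 ∧ obs[k % obs.length]'hj0 = r2
    · rw [if_pos ⟨hmem.mpr hmatch, hlen⟩,
         if_pos (by rw [Prod.mk.injEq]; exact ⟨hmatch.1, hmatch.2⟩)]
      rfl
    · rw [if_neg (fun hc => hmatch (hmem.mp hc.1)),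
         if_neg (by rw [Prod.mk.injEq]; exact fun hc => hmatch ⟨hc.1, hc.2⟩)]
      have hlhs := grid_getElem? d obs (k / obs.length) (k % obs.length) hi0 hj0
      rw [hkeq] at hlhs
      rw [hlhs]
  · have h1 : (pvGrid d obs)[k]? = none := by
      rw [List.getElem?_eq_none]; rw [grid_length]; omega
    have h2 : (pvGrid (PySem.Dict.insert d (r0, r2) p) obs)[k]? = none := by
      rw [List.getElem?_eq_none]; rw [grid_length]; omega
    rw [h1, h2, if_neg]
    rw [grid_length]
    exact fun hc => hk hc.2

theorem flatMap_const_replicate (m : Nat) :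
    ∀ (l : List String), l.flatMap (fun _ => List.replicate m (0 : Int))
      = List.replicate (l.length * m) 0 := by
  intro l
  induction l with
  | nil => simp
  | cons x xs ih =>
    rw [List.flatMap_cons, ih, List.length_cons, Nat.succ_mul, Nat.add_comm, List.replicate_add]

theorem grid_empty (obs : List String) :
    pvGrid (PySem.Dict.empty : PySem.Dict (String × String) Int) obs
    = List.replicate (obs.length * obs.length) 0 := by
  have hrow : pvRow (PySem.Dict.empty : PySem.Dict (String × String) Int) obs
      = fun _ => List.replicate obs.length 0 := by
    funext ob1
    unfold pvRow
    have h : ∀ ob2 : String, ((PySem.Dict.empty : PySem.Dict (String × String) Int).get?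
        (ob1, ob2)).getD 0 = 0 := fun _ => rfl
    simp only [h, List.map_const']
  unfold pvGrid
  rw [hrow, flatMap_const_replicate]

theorem B_grid (relationships : List (List String)) (ob_names : List String) :
    hash_sg_alt relationships ob_names = pvGrid (pvDict relationships) ob_names := by
  rw [hash_sg_alt_eq]
  induction relationships using List.reverseRecOn with
  | nil =>
    rw [List.foldl_nil]
    unfold pvDict
    rw [List.foldl_nil, grid_empty]
  | append_singleton rels r ih =>
    rw [List.foldl_append, List.foldl_cons, List.foldl_nil, ih]
    unfold pvDict
    rw [List.foldl_append, List.foldl_cons, List.foldl_nil]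
    rw [show List.foldl (fun d rel =>
        if PySem.List.pyGetD rel 1 "" ≠ "__in_image__" then
          PySem.Dict.insert d (PySem.List.pyGetD rel 0 "", PySem.List.pyGetD rel 2 "")
            (PySem.Dict.getD pv_pred2id (PySem.List.pyGetD rel 1 "") 0)
        else d) PySem.Dict.empty rels = pvDict rels from rfl]
    unfold pvStepB
    by_cases h : PySem.List.pyGetD r 1 "" ≠ "__in_image__"
    · rw [if_pos h, if_pos h]
      exact writeRel_eq ob_names (pvDict rels) (PySem.List.pyGetD r 0 "")
        (PySem.List.pyGetD r 2 "") (PySem.Dict.getD pv_pred2id (PySem.List.pyGetD r 1 "") 0)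
    · rw [if_neg h, if_neg h]

theorem ports_eq (relationships : List (List String)) (ob_names : List String) :
    hash_sg relationships ob_names = hash_sg_alt relationships ob_names := by
  rw [A_grid, B_grid]

-- ===== VERDICT (by name: the statement is the Claim_ definition above) =====
theorem hash_sg_spec : Claim_equal_hash_sg := by
  intro relationships ob_names _ _
  unfold Spec_hash_sg
  exact ports_eq relationships ob_names
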